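-- pv_equiv track=rewrite | github.com/Juandi-M/OBD-II-python-fulldatabase | obd/obd_parse.py | find_obd_response_payload
-- ===== SOURCE A (Python) =====
-- from typing import List, Dict, Tuple, Optional
--
-- def find_obd_response_payload(
--     merged_payloads: Dict[str, List[str]],
--     expected_prefix: List[str],
--     prefer_ecus: Optional[List[str]] = None,
-- ) -> Optional[Tuple[str, List[str]]]:
--     """
--     Find ECU whose merged payload contains expected_prefix.
--     If prefer_ecus provided, try those ECUs first (in order).
--     Returns (ecu, payload_from_prefix) or None.
--     """
--     ecu_order = list(merged_payloads.keys())
--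
--     if prefer_ecus:
--         # stable ordering: preferred first, then the rest
--         preferred = [e for e in prefer_ecus if e in merged_payloads]
--         rest = [e for e in ecu_order if e not in preferred]
--         ecu_order = preferred + rest
--
--     n = len(expected_prefix)
--     for ecu in ecu_order:
--         payload = merged_payloads.get(ecu, [])
--         for i in range(0, max(0, len(payload) - n + 1)):
--             if payload[i : i + n] == expected_prefix:
--                 return ecu, payload[i:]
--     return None
-- ===== SOURCE B (Python) =====
-- from typing import List, Dict, Tuple, Optional
--
--
-- def _shift_and(payload: List[str], masks: Dict[str, int], goal: int, n: int) -> Optional[int]: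
--     """Bit-parallel Shift-And scan: bit j of state is set iff pattern[:j+1] is a
--     suffix of the tokens read so far.  Returns the start index of the first
--     occurrence of the (precompiled) pattern in payload, or None."""
--     state = 0
--     for i, tok in enumerate(payload):
--         state = ((state << 1) | 1) & masks.get(tok, 0)
--         if state & goal:
--             return i - n + 1
--     return None
--
--
-- def find_obd_response_payload(
--     merged_payloads: Dict[str, List[str]],
--     expected_prefix: List[str],
--     prefer_ecus: Optional[List[str]] = None,
-- ) -> Optional[Tuple[str, List[str]]]:
--     order = list(merged_payloads)
--     if prefer_ecus:
--         preferred = [e for e in prefer_ecus if e in merged_payloads]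
--         in_pref = set(preferred)
--         order = preferred + [e for e in order if e not in in_pref]
--     # compile the pattern once: one bitmask per distinct token
--     n = len(expected_prefix)
--     masks: Dict[str, int] = {}
--     for j, tok in enumerate(expected_prefix):
--         masks[tok] = masks.get(tok, 0) | (1 << j)
--     goal = 1 << (n - 1) if n else 0
--     for ecu in order:
--         payload = merged_payloads[ecu]
--         if n == 0:
--             return ecu, payload
--         if n <= len(payload):
--             i = _shift_and(payload, masks, goal, n)
--             if i is not None:
--                 return ecu, payload[i:]
--     return None
-- ===== Notes on version B (the rewrite author's own statement) =====
-- stated objective: faster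
-- what changed: B replaces A's slice-and-compare scan over every start position of every payload with a bit-parallel Shift-And automaton: the pattern is compiled once into one bitmask per distinct token, then each candidate payload is scanned in a single pass doing one shift/or/and step per element (payloads shorter than the pattern are skipped), returning the first position where the full-match bit fires.
import Mathlib
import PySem

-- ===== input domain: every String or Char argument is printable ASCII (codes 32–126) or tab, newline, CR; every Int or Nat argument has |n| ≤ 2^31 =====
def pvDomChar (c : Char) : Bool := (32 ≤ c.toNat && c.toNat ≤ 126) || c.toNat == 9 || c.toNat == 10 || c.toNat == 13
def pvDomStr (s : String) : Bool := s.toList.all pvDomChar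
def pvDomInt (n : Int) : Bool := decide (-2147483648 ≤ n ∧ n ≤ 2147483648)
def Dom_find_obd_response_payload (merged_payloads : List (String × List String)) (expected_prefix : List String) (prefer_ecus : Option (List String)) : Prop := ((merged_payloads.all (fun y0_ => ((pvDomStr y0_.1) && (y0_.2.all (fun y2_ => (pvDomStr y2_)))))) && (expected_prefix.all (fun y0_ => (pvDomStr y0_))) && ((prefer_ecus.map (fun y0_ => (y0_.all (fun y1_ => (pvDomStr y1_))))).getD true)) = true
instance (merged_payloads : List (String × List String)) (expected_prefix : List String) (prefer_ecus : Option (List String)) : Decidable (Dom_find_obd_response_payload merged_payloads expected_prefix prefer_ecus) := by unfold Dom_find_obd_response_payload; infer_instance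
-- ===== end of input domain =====

-- B replaces A's slice-and-compare scan at every payload position with a bit-parallel
-- Shift-And automaton (one precomputed bitmask per token, one bitwise step per payload
-- element); return value proved identical.

-- ===== PORT A =====
-- inner 'for i in range(0, max(0, len(payload) - n + 1)): if payload[i:i+n] == expected_prefix: return payload[i:]'
def pvAScan (payload expected_prefix : List String) : List Int → Option (List String)
  | [] => none
  | i :: is =>
    if PySem.List.slice payload (some i) (some (i + (expected_prefix.length : Int))) = expected_prefix
    then some (PySem.List.slice payload (some i) none)
    else pvAScan payload expected_prefix is

-- outer 'for ecu in ecu_order: …' with the early return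
def pvALoop (d : PySem.Dict String (List String)) (expected_prefix : List String) : List String → Option (String × List String)
  | [] => none
  | ecu :: rest =>
    let payload := d.getD ecu []
    match pvAScan payload expected_prefix
        (PySem.List.pyRange 0 (max 0 ((payload.length : Int) - (expected_prefix.length : Int) + 1)) 1) with
    | some s => some (ecu, s)
    | none => pvALoop d expected_prefix rest

def find_obd_response_payload (merged_payloads : List (String × List String)) (expected_prefix : List String) (prefer_ecus : Option (List String)) : Option (String × List String) :=
  let d := PySem.Dict.ofList merged_payloads
  let ecu_order := d.keys
  let ecu_order :=
    match prefer_ecus with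
    | some (pe@(_ :: _)) =>            -- 'if prefer_ecus:' — None and [] are falsy
      let preferred := pe.filter (fun e => d.contains e)
      let rest := ecu_order.filter (fun e => !(preferred.contains e))
      preferred ++ rest
    | _ => ecu_order
  pvALoop d expected_prefix ecu_order

-- ===== PORT B =====
-- 'for j, tok in enumerate(pattern): masks[tok] = masks.get(tok, 0) | (1 << j)'
def pvMasksStep (st : PySem.Dict String Nat × Nat) (tok : String) : PySem.Dict String Nat × Nat :=
  (st.1.modify tok 0 (fun m => m ||| (1 <<< st.2)), st.2 + 1)

def pvMasks (pattern : List String) : PySem.Dict String Nat :=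
  (pattern.foldl pvMasksStep (PySem.Dict.empty, 0)).1

-- '_shift_and': 'for i, tok in enumerate(payload): state = ((state << 1) | 1) & masks.get(tok, 0); if state & goal: return i - n + 1'
def pvSALoop (masks : PySem.Dict String Nat) (goal n : Nat) : Nat → Nat → List String → Option Int
  | _, _, [] => none
  | state, i, tok :: rest =>
    let st := ((state <<< 1) ||| 1) &&& masks.getD tok 0
    if st &&& goal ≠ 0 then some ((i : Int) - (n : Int) + 1)
    else pvSALoop masks goal n st (i + 1) rest

-- 'for ecu in order: …' with the early returns and the length guard
def pvBLoop (d : PySem.Dict String (List String)) (masks : PySem.Dict String Nat) (goal n : Nat) : List String → Option (String × List String)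
  | [] => none
  | ecu :: rest =>
    let payload := d.getD ecu []   -- merged_payloads[ecu]: ecu is always a key of d here, so getD is exact
    if n = 0 then some (ecu, payload)
    else if n ≤ payload.length then
      match pvSALoop masks goal n 0 0 payload with
      | some i => some (ecu, PySem.List.slice payload (some i) none)
      | none => pvBLoop d masks goal n rest
    else pvBLoop d masks goal n rest

def find_obd_response_payload_alt (merged_payloads : List (String × List String)) (expected_prefix : List String) (prefer_ecus : Option (List String)) : Option (String × List String) :=
  let d := PySem.Dict.ofList merged_payloads
  let order :=
    match prefer_ecus with
    | some pe =>
      if pe.isEmpty then d.keys          -- 'if prefer_ecus:' — [] is falsy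
      else
        let preferred := pe.filter (fun e => d.contains e)
        let in_pref : PySem.Set String := PySem.Set.ofList preferred
        preferred ++ d.keys.filter (fun e => !(PySem.Set.contains in_pref e))
    | none => d.keys
  let n := expected_prefix.length
  let masks := pvMasks expected_prefix
  let goal := if n = 0 then 0 else 1 <<< (n - 1)   -- '1 << (n - 1) if n else 0'
  pvBLoop d masks goal n order

-- ===== PRECONDITION & SPEC =====
def Spec_find_obd_response_payload (merged_payloads : List (String × List String)) (expected_prefix : List String) (prefer_ecus : Option (List String)) (out : Option (String × List String)) : Prop := out = find_obd_response_payload_alt merged_payloads expected_prefix prefer_ecus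
instance (merged_payloads : List (String × List String)) (expected_prefix : List String) (prefer_ecus : Option (List String)) (out : Option (String × List String)) : Decidable (Spec_find_obd_response_payload merged_payloads expected_prefix prefer_ecus out) := by unfold Spec_find_obd_response_payload; infer_instance

-- ===== CLAIM (what is proved, stated in full; the proofs are below) =====
def Claim_equal_find_obd_response_payload : Prop := ∀ (merged_payloads : List (String × List String)) (expected_prefix : List String) (prefer_ecus : Option (List String)), Dom_find_obd_response_payload merged_payloads expected_prefix prefer_ecus → Spec_find_obd_response_payload merged_payloads expected_prefix prefer_ecus (find_obd_response_payload merged_payloads expected_prefix prefer_ecus)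

-- ===== LEMMAS AND PROOFS =====

-- 'payload[j:j+n] == pattern' at a Nat start index
def pvMatchAt (payload pattern : List String) (j : Nat) : Bool :=
  decide ((payload.drop j).take pattern.length = pattern)

-- 'pattern is a suffix of payload[:e+1]' — a match ENDING at index e
def pvEnd (payload pattern : List String) (e : Nat) : Bool :=
  decide (pattern <:+ payload.take (e + 1))

-- A's inner scan is first-match-position search
theorem pvAScan_range' (payload pfx : List String) (m : Nat) : ∀ s : Nat,
    pvAScan payload pfx ((List.range' s m).map (fun (k : Nat) => (k : Int)))
      = ((List.range' s m).find? (pvMatchAt payload pfx)).map (fun (j : Nat) => payload.drop j) := by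
  induction m with
  | zero => intro s; simp [pvAScan]
  | succ m ih =>
    intro s
    rw [List.range'_succ, List.map_cons]
    have hcast : (s : Int) + (pfx.length : Int) = ((s + pfx.length : Nat) : Int) := by push_cast; ring
    simp only [pvAScan, hcast, PySem.List.slice_natCast, PySem.List.slice_from_natCast,
      Nat.add_sub_cancel_left]
    by_cases hM : List.take pfx.length (List.drop s payload) = pfx
    · rw [if_pos hM, List.find?_cons_of_pos (by simp [pvMatchAt, hM]), Option.map_some]
    · rw [if_neg hM, List.find?_cons_of_neg (by simp [pvMatchAt, hM]), ih]

-- (l ++ [a]) is a suffix of (m ++ [b]) iff a = b and l is a suffix of m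
theorem pvConcatSuffix {α : Type} (l m : List α) (a b : α) :
    l ++ [a] <:+ m ++ [b] ↔ a = b ∧ l <:+ m := by
  rw [← List.reverse_prefix, ← (List.reverse_prefix (l₁ := l) (l₂ := m))]
  simp [List.cons_prefix_cons]

-- the token-mask dictionary: bit j of masks[tok] says pattern[j] == tok
theorem pvMasks_testBit_aux (pat : List String) : ∀ (d : PySem.Dict String Nat) (j0 : Nat) (tok : String) (j : Nat),
    ((pat.foldl pvMasksStep (d, j0)).1.getD tok 0).testBit j = true
      ↔ ((d.getD tok 0).testBit j = true ∨ ∃ k, ∃ _ : k < pat.length, pat[k] = tok ∧ j = j0 + k) := by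
  induction pat with
  | nil => intro d j0 tok j; simp
  | cons x xs ih =>
    intro d j0 tok j
    rw [List.foldl_cons]
    show ((xs.foldl pvMasksStep (d.modify x 0 (fun m => m ||| (1 <<< j0)), j0 + 1)).1.getD tok 0).testBit j = true ↔ _
    rw [ih]
    rw [PySem.Dict.getD_modify]
    constructor
    · rintro (hb | ⟨k, hk, hget, hj⟩)
      · by_cases hx : tok = x
        · rw [if_pos hx, Nat.testBit_or, Nat.one_shiftLeft, Nat.testBit_two_pow] at hb
          simp only [Bool.or_eq_true, decide_eq_true_eq] at hb
          rcases hb with hb | hb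
          · exact Or.inl (by rw [hx]; exact hb)
          · exact Or.inr ⟨0, by simp, by simp [hx.symm], by omega⟩
        · rw [if_neg hx] at hb; exact Or.inl hb
      · exact Or.inr ⟨k + 1, by simpa using Nat.succ_lt_succ hk, by simpa using hget, by omega⟩
    · rintro (hb | ⟨k, hk, hget, hj⟩)
      · left
        by_cases hx : tok = x
        · rw [if_pos hx, Nat.testBit_or, ← hx]; simp [hb]
        · rwa [if_neg hx]
      · cases k with
        | zero =>
          left
          have hx : tok = x := by simpa using hget.symm
          rw [if_pos hx, Nat.testBit_or, Nat.one_shiftLeft, Nat.testBit_two_pow]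
          simp [hj]
        | succ k =>
          right
          exact ⟨k, by simpa using Nat.lt_of_succ_lt_succ hk, by simpa using hget, by omega⟩

theorem pvMasks_testBit (pat : List String) (tok : String) (j : Nat) :
    ((pvMasks pat).getD tok 0).testBit j = true ↔ pat[j]? = some tok := by
  rw [pvMasks, pvMasks_testBit_aux pat PySem.Dict.empty 0 tok j]
  have hempty : (PySem.Dict.empty : PySem.Dict String Nat).getD tok 0 = 0 := by
    simp [PySem.Dict.getD, PySem.Dict.get?, PySem.Dict.empty]
  rw [hempty, Nat.zero_testBit, List.getElem?_eq_some_iff]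
  constructor
  · rintro (h | ⟨k, hk, hget, hj⟩)
    · simp at h
    · exact ⟨by omega, by subst hj; simpa using hget⟩
  · rintro ⟨h, hget⟩
    exact Or.inr ⟨j, h, hget, by omega⟩

-- one automaton step on the bit level
theorem pvStep_testBit (m c : Nat) (j : Nat) :
    (((m <<< 1) ||| 1) &&& c).testBit j
      = ((decide (j = 0) || m.testBit (j - 1)) && c.testBit j) := by
  rw [Nat.testBit_and, Nat.testBit_or, Nat.testBit_shiftLeft]
  have h1 : (1 : Nat).testBit j = decide (j = 0) := by
    have := Nat.testBit_two_pow (n := 0) (m := j)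
    simpa [eq_comm] using this
  cases j with
  | zero => simp [h1]
  | succ j => simp [h1]

theorem pvAndPow (a k : Nat) : (a &&& (1 <<< k) ≠ 0) ↔ a.testBit k = true := by
  rw [Nat.one_shiftLeft, Nat.and_two_pow]
  cases h : a.testBit k
  · simp
  · simp


-- the Shift-And loop finds the first END position of a match (as start index i-n+1)
theorem pvSALoop_eq (payload pfx : List String) (hn : pfx.length ≠ 0) :
    ∀ (rest : List String) (i m : Nat),
      payload.drop i = rest →
      (∀ j : Nat, m.testBit j = true ↔ (j < pfx.length ∧ pfx.take (j + 1) <:+ payload.take i)) →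
      pvSALoop (pvMasks pfx) (1 <<< (pfx.length - 1)) pfx.length m i rest
        = ((List.range' i (payload.length - i)).find? (pvEnd payload pfx)).map
            (fun (e : Nat) => (e : Int) - (pfx.length : Int) + 1) := by
  intro rest
  induction rest with
  | nil =>
    intro i m hdrop _
    rw [List.drop_eq_nil_iff] at hdrop
    rw [show payload.length - i = 0 by omega]
    simp [pvSALoop]
  | cons tok rest' ih =>
    intro i m hdrop hinv
    have hi : i < payload.length := by
      by_contra h
      rw [List.drop_eq_nil_iff.mpr (by omega)] at hdrop
      simp at hdrop
    have hcons := List.drop_eq_getElem_cons hi (l := payload)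
    rw [hdrop] at hcons
    have htok : tok = payload[i] := (List.cons.injEq ..).mp hcons |>.1
    have hrest : rest' = payload.drop (i + 1) := (List.cons.injEq ..).mp hcons |>.2
    -- the updated state's bits
    have htake : payload.take (i + 1) = payload.take i ++ [payload[i]] := by
      rw [List.take_add_one]
      simp [List.getElem?_eq_getElem hi]
    have hst : ∀ j : Nat,
        ((((m <<< 1) ||| 1) &&& (pvMasks pfx).getD tok 0).testBit j = true)
          ↔ (j < pfx.length ∧ pfx.take (j + 1) <:+ payload.take (i + 1)) := by
      intro j
      rw [pvStep_testBit]
      simp only [Bool.and_eq_true, Bool.or_eq_true, decide_eq_true_eq]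
      rw [pvMasks_testBit, List.getElem?_eq_some_iff]
      constructor
      · rintro ⟨hprev, hj, hpj⟩
        refine ⟨hj, ?_⟩
        have htakep : pfx.take (j + 1) = pfx.take j ++ [pfx[j]] := by
          rw [List.take_add_one]; simp [List.getElem?_eq_getElem hj]
        rw [htake, htakep, pvConcatSuffix]
        refine ⟨by rw [hpj, htok], ?_⟩
        rcases hprev with h0 | hb
        · subst h0; simp
        · rcases (hinv (j - 1)).mp hb with ⟨-, hsuf⟩
          rcases Nat.eq_zero_or_pos j with h0 | hpos
          · subst h0; simp
          · rwa [show j - 1 + 1 = j by omega] at hsuf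
      · rintro ⟨hj, hsuf⟩
        have htakep : pfx.take (j + 1) = pfx.take j ++ [pfx[j]] := by
          rw [List.take_add_one]; simp [List.getElem?_eq_getElem hj]
        rw [htake, htakep, pvConcatSuffix] at hsuf
        refine ⟨?_, hj, by rw [← htok] at hsuf; exact hsuf.1⟩
        rcases Nat.eq_zero_or_pos j with h0 | hpos
        · exact Or.inl h0
        · refine Or.inr ((hinv (j - 1)).mpr ⟨by omega, ?_⟩)
          rw [show j - 1 + 1 = j by omega]
          exact hsuf.2
    have hgoal : ((((m <<< 1) ||| 1) &&& (pvMasks pfx).getD tok 0) &&& (1 <<< (pfx.length - 1)) ≠ 0)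
        ↔ pvEnd payload pfx i = true := by
      rw [pvAndPow, hst (pfx.length - 1), show pfx.length - 1 + 1 = pfx.length by omega,
        List.take_length, pvEnd]
      simp only [decide_eq_true_eq]
      exact and_iff_right (by omega)
    have hrange : List.range' i (payload.length - i)
        = i :: List.range' (i + 1) (payload.length - (i + 1)) := by
      rw [show payload.length - i = (payload.length - (i + 1)) + 1 by omega, List.range'_succ]
    rw [pvSALoop, hrange]
    by_cases hend : pvEnd payload pfx i = true
    · rw [if_pos (hgoal.mpr hend), List.find?_cons_of_pos hend, Option.map_some]
    · rw [if_neg (fun hc => hend (hgoal.mp hc)), List.find?_cons_of_neg (by simpa using hend)]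
      exact ih (i + 1) _ hrest.symm hst

-- a match ending at e < L (with n ≤ e+1) is exactly a match starting at e+1-n
theorem pvEnd_matchAt (payload pfx : List String) {e : Nat}
    (he : e < payload.length) (hne : pfx.length ≤ e + 1) :
    pvEnd payload pfx e = pvMatchAt payload pfx (e + 1 - pfx.length) := by
  have hlen : (payload.take (e + 1)).length = e + 1 := by
    rw [List.length_take]; omega
  rw [pvEnd, pvMatchAt]
  simp only [decide_eq_decide]
  rw [List.suffix_iff_eq_drop, hlen, List.drop_take,
    show e + 1 - (e + 1 - pfx.length) = pfx.length by omega]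
  exact eq_comm

theorem pvEnd_bound (payload pfx : List String) {e : Nat} (he : e < payload.length)
    (h : pvEnd payload pfx e = true) : pfx.length ≤ e + 1 := by
  rw [pvEnd, decide_eq_true_eq] at h
  have := h.length_le
  rw [List.length_take] at this
  omega

-- translate first-END search into first-START search
theorem pvFind_translate (payload pfx : List String) (hn : pfx.length ≠ 0) :
    ((List.range' 0 payload.length).find? (pvEnd payload pfx)).map
        (fun (e : Nat) => (e : Int) - (pfx.length : Int) + 1)
      = ((List.range' 0 (payload.length + 1 - pfx.length)).find? (pvMatchAt payload pfx)).map
          (fun (s : Nat) => (s : Int)) := by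
  cases hfind : (List.range' 0 payload.length).find? (pvEnd payload pfx) with
  | none =>
    rw [List.find?_eq_none] at hfind
    rw [Option.map_none, eq_comm, Option.map_eq_none_iff, List.find?_eq_none]
    intro s hs
    rw [List.mem_range'_1] at hs
    have hsL : s + pfx.length ≤ payload.length := by omega
    have he : s + pfx.length - 1 < payload.length := by omega
    have := hfind (s + pfx.length - 1) (List.mem_range'_1.mpr ⟨by omega, by omega⟩)
    rw [pvEnd_matchAt payload pfx he (by omega),
      show s + pfx.length - 1 + 1 - pfx.length = s by omega] at this
    simpa using this
  | some e =>
    rw [List.find?_eq_some_iff_getElem] at hfind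
    obtain ⟨hpe, idx, hidx, hget, hmin⟩ := hfind
    rw [List.getElem_range'] at hget
    have hidx' : idx < payload.length := by simpa using hidx
    have heidx : e = idx := by omega
    subst heidx
    have hne : pfx.length ≤ e + 1 := pvEnd_bound payload pfx hidx' hpe
    have hs := pvEnd_matchAt payload pfx hidx' hne
    rw [Option.map_some, eq_comm, Option.map_eq_some_iff]
    refine ⟨e + 1 - pfx.length, ?_, by omega⟩
    rw [List.find?_eq_some_iff_getElem]
    refine ⟨by rw [← hs]; exact hpe, e + 1 - pfx.length, by simpa using (by omega : e + 1 - pfx.length < payload.length + 1 - pfx.length), by rw [List.getElem_range']; omega, ?_⟩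
    intro j hj
    rw [List.getElem_range']
    simp only [Nat.zero_add, Nat.one_mul]
    have hje : j + pfx.length - 1 < e := by omega
    have hjL : j + pfx.length - 1 < payload.length := by omega
    have hfail := hmin (j + pfx.length - 1) (by simpa using hje)
    rw [List.getElem_range'] at hfail
    simp only [Nat.zero_add, Nat.one_mul] at hfail
    rw [pvEnd_matchAt payload pfx hjL (by omega),
      show j + pfx.length - 1 + 1 - pfx.length = j by omega] at hfail
    exact hfail

-- B's scan (started on state 0) finds the first match position, for a nonempty pattern
theorem pvSAFind_eq (payload pfx : List String) (hpos : 0 < pfx.length) :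
    pvSALoop (pvMasks pfx) (1 <<< (pfx.length - 1)) pfx.length 0 0 payload
      = ((List.range' 0 (payload.length + 1 - pfx.length)).find? (pvMatchAt payload pfx)).map
          (fun (s : Nat) => (s : Int)) := by
  rw [pvSALoop_eq payload pfx (by omega) payload 0 0 rfl
    (by intro j
        rw [Nat.zero_testBit]
        simp only [Bool.false_eq_true, false_iff, not_and]
        intro hj hsuf
        have hle := hsuf.length_le
        rw [List.length_take, List.take_zero, List.length_nil] at hle
        omega),
    Nat.sub_zero, pvFind_translate payload pfx (by omega)]

-- the two per-ECU loops agree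
theorem pvLoop_eq (d : PySem.Dict String (List String)) (pfx : List String) : ∀ order : List String,
    pvALoop d pfx order
      = pvBLoop d (pvMasks pfx) (if pfx.length = 0 then 0 else 1 <<< (pfx.length - 1)) pfx.length order := by
  intro order
  induction order with
  | nil => rfl
  | cons ecu rest ih =>
    simp only [pvALoop, pvBLoop]
    rw [show max 0 (((d.getD ecu []).length : Int) - (pfx.length : Int) + 1)
          = (((d.getD ecu []).length + 1 - pfx.length : Nat) : Int) by omega,
      PySem.List.pyRange_zero_natCast, List.range_eq_range', pvAScan_range']
    by_cases hn : pfx.length = 0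
    · have hpfx : pfx = [] := List.length_eq_zero_iff.mp hn
      rw [if_pos hn, hn, Nat.sub_zero, List.range'_succ,
        List.find?_cons_of_pos (by simp [pvMatchAt, hpfx])]
      simp
    · rw [if_neg hn, if_neg hn, pvSAFind_eq _ _ (by omega)]
      rw [if_neg hn] at ih
      by_cases hL : pfx.length ≤ (d.getD ecu []).length
      · rw [if_pos hL]
        cases (List.range' 0 ((d.getD ecu []).length + 1 - pfx.length)).find? (pvMatchAt (d.getD ecu []) pfx) with
        | none => simpa using ih
        | some s => simp [PySem.List.slice_from_natCast]
      · rw [if_neg hL, show (d.getD ecu []).length + 1 - pfx.length = 0 by omega]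
        simpa using ih

-- the two order constructions agree
theorem pvOrder_eq (preferred keys : List String) :
    keys.filter (fun e => !(preferred.contains e))
      = keys.filter (fun e => !(PySem.Set.contains (PySem.Set.ofList preferred) e)) := by
  apply List.filter_congr
  intro e _
  have hm : PySem.Set.contains (PySem.Set.ofList preferred) e = preferred.contains e := by
    by_cases he : e ∈ preferred
    · simp [PySem.Set.contains, (PySem.Set.mem_ofList preferred e).mpr he, he]
    · have h2 : e ∉ PySem.Set.ofList preferred :=
        fun hc => he ((PySem.Set.mem_ofList preferred e).mp hc)
      simp [PySem.Set.contains, he, h2]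
  rw [hm]

-- ===== VERDICT (by name: the statement is the Claim_ definition above) =====
theorem find_obd_response_payload_spec : Claim_equal_find_obd_response_payload := by
  intro merged pfx pe _
  unfold Spec_find_obd_response_payload find_obd_response_payload find_obd_response_payload_alt
  cases pe with
  | none => exact pvLoop_eq _ _ _
  | some l =>
    cases l with
    | nil => exact pvLoop_eq _ _ _
    | cons x xs =>
      dsimp only [List.isEmpty_cons]
      rw [pvOrder_eq, pvLoop_eq]
      simp
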